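-- pv_equiv track=rewrite | github.com/plat16022005/test-github | Bai06/Xử lí chuỗi/Bai22.py | kt_can_cuoc
-- ===== SOURCE A (Python) =====
-- def kt_can_cuoc(a):
--     if len(a) != 12:
--         return False
--     for i in a:
--         if not("0" <= i and i <= "9"):
--             return False
--     if a[0] != "0":
--         return False
--     if a[3] != "1" and a[3] != "0":
--         return False
--     return True
-- ===== SOURCE B (Python) =====
-- import re
--
-- _ID_RE = re.compile(r"0[0-9][0-9][01][0-9]{8}")
--
-- def kt_can_cuoc(a):
--     return bool(_ID_RE.fullmatch(a))
-- ===== Notes on version B (the rewrite author's own statement) =====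
-- stated objective: idiomatic
-- what changed: Replaces the length check, explicit digit loop and positional indexing with a single anchored regex fullmatch r'0[0-9][0-9][01][0-9]{8}' (ASCII-only [0-9] classes), matching in one automaton pass.
import Mathlib
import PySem

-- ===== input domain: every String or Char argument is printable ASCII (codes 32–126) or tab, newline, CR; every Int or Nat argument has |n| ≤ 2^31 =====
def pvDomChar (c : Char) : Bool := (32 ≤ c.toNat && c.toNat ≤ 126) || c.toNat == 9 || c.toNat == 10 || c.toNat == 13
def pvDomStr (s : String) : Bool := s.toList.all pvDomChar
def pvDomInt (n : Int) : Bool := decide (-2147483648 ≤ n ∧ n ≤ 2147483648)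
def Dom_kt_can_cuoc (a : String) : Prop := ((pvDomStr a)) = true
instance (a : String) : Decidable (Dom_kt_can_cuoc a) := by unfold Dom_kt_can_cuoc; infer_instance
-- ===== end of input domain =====

-- ===== PORT A =====
-- Port of A: length test, digit loop with early return (= all), positional checks via pyGet?.
def kt_can_cuoc (a : String) : Bool :=
  let l := a.toList
  if l.length ≠ 12 then false
  else if ¬ (l.all fun i => decide ('0' ≤ i) && decide (i ≤ '9')) then false
  else if PySem.List.pyGet? l 0 ≠ some '0' then false
  else if PySem.List.pyGet? l 3 ≠ some '1' ∧ PySem.List.pyGet? l 3 ≠ some '0' then false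
  else true

-- ===== PORT B =====
-- B matches the anchored regex 0[0-9][0-9][01][0-9]{8}; here the off-the-shelf regex
-- engine is ported as the equivalent positional pattern match on the character list.
def pvIsDigit (c : Char) : Bool := decide ('0' ≤ c) && decide (c ≤ '9')

def kt_can_cuoc_alt (a : String) : Bool :=
  match a.toList with
  | ['0', c1, c2, c3, c4, c5, c6, c7, c8, c9, c10, c11] =>
    pvIsDigit c1 && pvIsDigit c2 && (c3 == '0' || c3 == '1') &&
    pvIsDigit c4 && pvIsDigit c5 && pvIsDigit c6 && pvIsDigit c7 &&
    pvIsDigit c8 && pvIsDigit c9 && pvIsDigit c10 && pvIsDigit c11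
  | _ => false

-- ===== PRECONDITION & SPEC =====
def Spec_kt_can_cuoc (a : String) (out : Bool) : Prop := out = kt_can_cuoc_alt a
instance (a : String) (out : Bool) : Decidable (Spec_kt_can_cuoc a out) := by unfold Spec_kt_can_cuoc; infer_instance

-- ===== CLAIM (what is proved, stated in full; the proofs are below) =====
def Claim_equal_kt_can_cuoc : Prop := ∀ (a : String), Dom_kt_can_cuoc a → Spec_kt_can_cuoc a (kt_can_cuoc a)

-- ===== LEMMAS AND PROOFS =====

lemma kt_core_eq (l : List Char) :
    (if l.length ≠ 12 then false
     else if ¬ (l.all fun i => decide ('0' ≤ i) && decide (i ≤ '9')) then false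
     else if PySem.List.pyGet? l 0 ≠ some '0' then false
     else if PySem.List.pyGet? l 3 ≠ some '1' ∧ PySem.List.pyGet? l 3 ≠ some '0' then false
     else true)
    =
    (match l with
     | ['0', c1, c2, c3, c4, c5, c6, c7, c8, c9, c10, c11] =>
       pvIsDigit c1 && pvIsDigit c2 && (c3 == '0' || c3 == '1') &&
       pvIsDigit c4 && pvIsDigit c5 && pvIsDigit c6 && pvIsDigit c7 &&
       pvIsDigit c8 && pvIsDigit c9 && pvIsDigit c10 && pvIsDigit c11
     | _ => false) := by
  match l with
  | [c0, c1, c2, c3, c4, c5, c6, c7, c8, c9, c10, c11] =>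
    simp only [List.length, PySem.List.pyGet?, PySem.List.pyIdx?, List.all, pvIsDigit]
    norm_num
    by_cases h0 : c0 = '0' <;> by_cases h3a : c3 = '0' <;> by_cases h3b : c3 = '1' <;>
      simp_all [Bool.and_assoc]
  | c0 :: c1 :: c2 :: c3 :: c4 :: c5 :: c6 :: c7 :: c8 :: c9 :: c10 :: c11 :: c12 :: rest =>
    simp [List.length]
  | [] => simp
  | [c0] => simp
  | [c0, c1] => simp
  | [c0, c1, c2] => simp
  | [c0, c1, c2, c3] => simp
  | [c0, c1, c2, c3, c4] => simp
  | [c0, c1, c2, c3, c4, c5] => simp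
  | [c0, c1, c2, c3, c4, c5, c6] => simp
  | [c0, c1, c2, c3, c4, c5, c6, c7] => simp
  | [c0, c1, c2, c3, c4, c5, c6, c7, c8] => simp
  | [c0, c1, c2, c3, c4, c5, c6, c7, c8, c9] => simp
  | [c0, c1, c2, c3, c4, c5, c6, c7, c8, c9, c10] => simp

-- ===== VERDICT (by name: the statement is the Claim_ definition above) =====
theorem kt_can_cuoc_spec : Claim_equal_kt_can_cuoc := by
  intro a _
  unfold Spec_kt_can_cuoc kt_can_cuoc kt_can_cuoc_alt
  exact kt_core_eq a.toList
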